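-- pv_equiv track=rewrite | github.com/lywgit/project-Euler | prob_018.py | children_array
-- ===== SOURCE A (Python) =====
-- def level_array(length):
--     levels = [] # level label starts from 0
--     i = 0
--     while len(levels) < length:
--         levels.extend([i] * (i+1))
--         i += 1
--     return levels
--
-- def children_array(length):
--     levels = level_array(length)
--     left  = [None] * length
--     right = [None] * length
--     for index in range(length):
--         level = levels[index]
--         left[index] = index + level + 1
--         right[index] = index + level + 2
--     return (left, right)
-- ===== SOURCE B (Python) =====
-- def children_array(length):
--     # One pass, no levels table: track the current level and the index at
--     # which the next level starts (triangular-number boundary).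
--     left = []
--     right = []
--     level = 0
--     boundary = 1  # index where level 1 starts
--     for index in range(length):
--         if index == boundary:
--             level += 1
--             boundary += level + 1
--         left.append(index + level + 1)
--         right.append(index + level + 2)
--     return (left, right)
-- ===== Notes on version B (the rewrite author's own statement) =====
-- stated objective: simpler
-- what changed: B drops the level_array table entirely: a single pass tracks the current level and the next triangular-number boundary, computing each child index directly instead of building a levels list and indexing into it.
import Mathlib
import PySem

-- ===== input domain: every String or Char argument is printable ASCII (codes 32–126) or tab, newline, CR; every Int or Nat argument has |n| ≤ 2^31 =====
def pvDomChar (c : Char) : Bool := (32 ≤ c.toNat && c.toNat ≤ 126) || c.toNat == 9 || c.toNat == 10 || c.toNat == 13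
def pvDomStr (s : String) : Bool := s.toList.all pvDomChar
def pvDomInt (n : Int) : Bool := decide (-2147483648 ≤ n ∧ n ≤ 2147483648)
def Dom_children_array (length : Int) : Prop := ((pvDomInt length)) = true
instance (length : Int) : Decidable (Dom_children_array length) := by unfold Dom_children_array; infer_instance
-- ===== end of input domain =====

-- B replaces A's "build a levels table, then scan it" with a single pass that tracks the
-- current level and the next triangular boundary (objective: simpler — no intermediate table).

-- ===== PORT A =====
-- while len(levels) < length: levels.extend([i]*(i+1)); i += 1
-- (i starts at 0 and only increases, so it is carried as a Nat; [i]*(i+1) = List.replicate (i+1) i)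
def levelArrayLoop (length : Int) (levels : List Int) (i : Nat) : List Int :=
  if (levels.length : Int) < length then
    levelArrayLoop length (levels ++ List.replicate (i + 1) (i : Int)) (i + 1)
  else levels
termination_by (length - levels.length).toNat
decreasing_by simp only [List.length_append, List.length_replicate]; omega

def level_array (length : Int) : List Int := levelArrayLoop length [] 0

-- loop body: left[index] = index + level + 1; right[index] = index + level + 2.
-- Python fills preallocated [None]*length slots in index order, i.e. appends one value per
-- iteration; levels[index] is always in range here, so the total pyGetD is exact.
def stepA (levels : List Int) (acc : List Int × List Int) (index : Int) : List Int × List Int :=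
  let level := PySem.List.pyGetD levels index 0
  (acc.1 ++ [index + level + 1], acc.2 ++ [index + level + 2])

def children_array (length : Int) : List Int × List Int :=
  (PySem.List.pyRange 0 length 1).foldl (stepA (level_array length)) ([], [])

-- ===== PORT B =====
-- state = ((left, right), level, boundary); boundary += level + 1 happens after level += 1
def stepB (st : (List Int × List Int) × Int × Int) (index : Int) :
    (List Int × List Int) × Int × Int :=
  let (lr, level, boundary) := st
  let (level, boundary) :=
    if index = boundary then (level + 1, boundary + (level + 1) + 1) else (level, boundary)
  ((lr.1 ++ [index + level + 1], lr.2 ++ [index + level + 2]), level, boundary)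

def children_array_alt (length : Int) : List Int × List Int :=
  ((PySem.List.pyRange 0 length 1).foldl stepB (([], []), 0, 1)).1

-- ===== PRECONDITION & SPEC =====
def Spec_children_array (length : Int) (out : List Int × List Int) : Prop := out = children_array_alt length
instance (length : Int) (out : List Int × List Int) : Decidable (Spec_children_array length out) := by unfold Spec_children_array; infer_instance

-- ===== CLAIM (what is proved, stated in full; the proofs are below) =====
def Claim_equal_children_array : Prop := ∀ (length : Int), Dom_children_array length → Spec_children_array length (children_array length)

-- ===== LEMMAS AND PROOFS =====

-- number of entries of the levels table up to (and including) level k-1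
def tri : Nat → Nat
  | 0 => 0
  | k + 1 => tri k + (k + 1)

-- the levels table after i iterations of A's while loop
def triL : Nat → List Int
  | 0 => []
  | i + 1 => triL i ++ List.replicate (i + 1) (i : Int)

-- the level of index k, evolving exactly as B's branch does
def levB : Nat → Nat
  | 0 => 0
  | k + 1 => if k + 1 = tri (levB k + 1) then levB k + 1 else levB k

lemma triL_length (i : Nat) : (triL i).length = tri i := by
  induction i with
  | zero => rfl
  | succ n ih => simp [triL, tri, ih]

lemma tri_le_tri {a b : Nat} (h : a ≤ b) : tri a ≤ tri b := by
  induction h with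
  | refl => exact le_rfl
  | @step m _ ih => exact le_trans ih (Nat.le_add_right (tri m) (m + 1))

lemma levB_bounds (k : Nat) : tri (levB k) ≤ k ∧ k < tri (levB k + 1) := by
  induction k with
  | zero => decide
  | succ n ih =>
    simp only [levB]
    split
    · next h =>
      have ht : tri (levB n + 1 + 1) = tri (levB n + 1) + (levB n + 1 + 1) := rfl
      omega
    · next h => omega

lemma loop_spec (length : Int) (i : Nat) :
    ∃ j, levelArrayLoop length (triL i) i = triL j ∧ length ≤ ((triL j).length : Int) := by
  rw [levelArrayLoop]
  split
  · have h2 : triL i ++ List.replicate (i + 1) (i : Int) = triL (i + 1) := rfl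
    rw [h2]; exact loop_spec length (i + 1)
  · exact ⟨i, rfl, by omega⟩
termination_by (length - (triL i).length).toNat
decreasing_by
  have : (triL (i + 1)).length = (triL i).length + (i + 1) := by simp [triL]
  omega

lemma triL_getD (j k L : Nat) (h1 : tri L ≤ k) (h2 : k < tri (L + 1)) (h3 : k < tri j) :
    (triL j).getD k 0 = (L : Int) := by
  induction j with
  | zero => simp [tri] at h3
  | succ n ih =>
    by_cases hk : k < tri n
    · rw [triL, List.getD_append _ _ _ _ (by rw [triL_length]; omega)]
      exact ih hk
    · -- tri n ≤ k < tri (n+1): the element lies in the replicate block, and L = n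
      have hL : L = n := by
        rcases Nat.lt_trichotomy L n with h | h | h
        · have := tri_le_tri (show L + 1 ≤ n from h)
          have h4 : tri (n + 1) = tri n + (n + 1) := rfl
          omega
        · exact h
        · have := tri_le_tri (show n + 1 ≤ L from h)
          have h4 : tri (n + 1) = tri n + (n + 1) := rfl
          omega
      subst hL
      have h4 : tri (L + 1) = tri L + (L + 1) := rfl
      rw [triL, List.getD_append_right _ _ _ _ (by rw [triL_length]; omega), triL_length]
      have hlt : k - tri L < L + 1 := by omega
      simp [List.getD, hlt]

lemma foldA_inv (levels : List Int) (n : Nat)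
    (h : ∀ k, k < n → levels.getD k 0 = (levB k : Int)) :
    (PySem.List.pyRange 0 (n : Int) 1).foldl (stepA levels) ([], [])
      = ((List.range n).map (fun k : Nat => (k : Int) + (levB k : Int) + 1),
         (List.range n).map (fun k : Nat => (k : Int) + (levB k : Int) + 2)) := by
  induction n with
  | zero => rw [PySem.List.pyRange_one_eq_nil (by omega)]; rfl
  | succ n ih =>
    have hc : ((n + 1 : Nat) : Int) = (n : Int) + 1 := by push_cast; ring
    rw [hc, PySem.List.pyRange_one_succ_right (by positivity), List.foldl_append,
      ih (fun k hk => h k (by omega))]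
    have hg : PySem.List.pyGetD levels ((n : Nat) : Int) 0 = (levB n : Int) := by
      rw [PySem.List.pyGetD_natCast]; exact h n (by omega)
    simp [stepA, hg, List.range_succ]

lemma foldB_inv (n : Nat) :
    (PySem.List.pyRange 0 (n : Int) 1).foldl stepB (([], []), 0, 1) =
      (((List.range n).map (fun k : Nat => (k : Int) + (levB k : Int) + 1),
        (List.range n).map (fun k : Nat => (k : Int) + (levB k : Int) + 2)),
       ((levB (n - 1) : Nat) : Int), ((tri (levB (n - 1) + 1) : Nat) : Int)) := by
  induction n with
  | zero => decide
  | succ n ih =>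
    have hc : ((n + 1 : Nat) : Int) = (n : Int) + 1 := by push_cast; ring
    rw [hc, PySem.List.pyRange_one_succ_right (by positivity), List.foldl_append, ih]
    rcases n with _ | m
    · decide
    · simp only [List.foldl_cons, List.foldl_nil, stepB, Nat.add_sub_cancel]
      split
      · next hbi =>
        have hb : (m + 1 : Nat) = tri (levB m + 1) := by exact_mod_cast hbi
        have hlev : levB (m + 1) = levB m + 1 := by rw [levB]; simp [hb]
        have htri : tri (levB m + 1 + 1) = tri (levB m + 1) + (levB m + 1 + 1) := rfl
        simp only [List.range_succ, List.map_append, List.map_cons, List.map_nil,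
          List.append_assoc, Prod.mk.injEq, hlev]
        push_cast [htri]
        refine ⟨⟨?_, ?_⟩, ?_, ?_⟩ <;> rfl
      · next hbi =>
        have hb : ¬ (m + 1 : Nat) = tri (levB m + 1) := by
          intro hcon; apply hbi; exact_mod_cast hcon
        have hlev : levB (m + 1) = levB m := by rw [levB]; simp [hb]
        simp only [List.range_succ, List.map_append, List.map_cons, List.map_nil,
          List.append_assoc, hlev]

-- ===== VERDICT (by name: the statement is the Claim_ definition above) =====
theorem children_array_spec : Claim_equal_children_array := by
  intro length _hdom
  unfold Spec_children_array
  by_cases hpos : length ≤ 0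
  · unfold children_array children_array_alt
    rw [PySem.List.pyRange_one_eq_nil hpos]
    rfl
  · obtain ⟨n, rfl⟩ : ∃ n : Nat, length = (n : Int) := ⟨length.toNat, by omega⟩
    obtain ⟨j, hj, hlen⟩ := loop_spec (n : Int) 0
    have hla : level_array (n : Int) = triL j := hj
    have hjn : (n : Int) ≤ (tri j : Int) := by rw [triL_length] at hlen; exact_mod_cast hlen
    have hget : ∀ k, k < n → (triL j).getD k 0 = (levB k : Int) := by
      intro k hk
      obtain ⟨hb1, hb2⟩ := levB_bounds k
      exact triL_getD j k (levB k) hb1 hb2 (by exact_mod_cast lt_of_lt_of_le (by exact_mod_cast hk : (k : Int) < (n : Int)) hjn)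
    unfold children_array children_array_alt
    rw [hla, foldA_inv (triL j) n hget, foldB_inv n]
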